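-- pv_equiv track=rewrite | github.com/sebvil/q_learning_project | scripts/q_learning.py | _is_goal_valid
-- ===== SOURCE A (Python) =====
-- def _is_goal_valid(goal):
--     goal_valid = True
--     found_pos = set()
--     for position in goal:
--         if position != 0 and position in found_pos:
--             goal_valid = False
--             break
--         found_pos.add(position)
--     return goal_valid
-- ===== SOURCE B (Python) =====
-- def _is_goal_valid(goal):
--     s = sorted(goal)
--     for a, b in zip(s, s[1:]):
--         if a == b != 0:
--             return False
--     return True
-- ===== Notes on version B (the rewrite author's own statement) =====
-- stated objective: alternative
-- what changed: Replaces A's hash-set membership loop by sort-then-adjacent-scan: sort the list and check that no two adjacent equal elements are nonzero (in a sorted list duplicates are adjacent), using no set at all.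
import Mathlib
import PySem

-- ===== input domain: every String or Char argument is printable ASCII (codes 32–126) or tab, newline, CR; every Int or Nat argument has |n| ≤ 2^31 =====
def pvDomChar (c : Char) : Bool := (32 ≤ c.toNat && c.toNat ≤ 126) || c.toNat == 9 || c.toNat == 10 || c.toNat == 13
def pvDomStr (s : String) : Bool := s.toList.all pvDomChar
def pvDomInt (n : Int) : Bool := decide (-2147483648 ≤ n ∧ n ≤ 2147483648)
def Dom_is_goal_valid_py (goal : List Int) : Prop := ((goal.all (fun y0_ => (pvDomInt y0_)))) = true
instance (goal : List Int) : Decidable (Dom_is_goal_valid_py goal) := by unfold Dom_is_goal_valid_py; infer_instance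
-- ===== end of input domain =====

-- B replaces A's hash-set membership loop by sort-then-adjacent-scan: sort, then check
-- that no two adjacent equal elements are nonzero (objective: alternative).


-- ===== PORT A =====
-- the 'for position in goal' loop with its early 'break'; state = found_pos
def pvLoopA : List Int → PySem.Set Int → Bool
  | [], _ => true
  | position :: rest, found_pos =>
      if position ≠ 0 ∧ position ∈ found_pos then false
      else pvLoopA rest (PySem.Set.add found_pos position)

def is_goal_valid_py (goal : List Int) : Bool :=
  pvLoopA goal PySem.Set.empty

-- ===== PORT B =====
-- the 'for a, b in zip(s, s[1:])' scan with early 'return False'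
def pvAdjScan : List Int → Bool
  | a :: b :: t => if a == b && !(a == 0) then false else pvAdjScan (b :: t)
  | _ => true

def is_goal_valid_py_alt (goal : List Int) : Bool :=
  pvAdjScan (PySem.List.sorted goal (fun x => x) false)

-- ===== PRECONDITION & SPEC =====
def Spec_is_goal_valid_py (goal : List Int) (out : Bool) : Prop := out = is_goal_valid_py_alt goal
instance (goal : List Int) (out : Bool) : Decidable (Spec_is_goal_valid_py goal out) := by unfold Spec_is_goal_valid_py; infer_instance

-- ===== CLAIM (what is proved, stated in full; the proofs are below) =====
def Claim_equal_is_goal_valid_py : Prop := ∀ (goal : List Int), Dom_is_goal_valid_py goal → Spec_is_goal_valid_py goal (is_goal_valid_py goal)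

-- ===== LEMMAS AND PROOFS =====

-- A's loop succeeds iff the nonzero elements are duplicate-free (and none already seen)
theorem pvLoopA_iff (l : List Int) (s : PySem.Set Int) :
    pvLoopA l s = true ↔
      (l.filter (fun p => decide (p ≠ 0))).Nodup ∧ ∀ x ∈ l, x ≠ 0 → x ∉ s := by
  induction l generalizing s with
  | nil => simp [pvLoopA]
  | cons p rest ih =>
      by_cases hp : p = 0
      · subst hp
        have hc : ¬((0 : Int) ≠ 0 ∧ (0 : Int) ∈ s) := fun h => h.1 rfl
        simp only [pvLoopA, if_neg hc]
        rw [ih]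
        constructor
        · rintro ⟨h1, h2⟩
          refine ⟨by simpa using h1, ?_⟩
          intro x hx hx0 hxs
          rw [List.mem_cons] at hx
          rcases hx with rfl | hx
          · exact hx0 rfl
          · exact h2 x hx hx0 (by simp [PySem.Set.mem_add, hxs])
        · rintro ⟨h1, h2⟩
          refine ⟨by simpa using h1, ?_⟩
          intro x hx hx0 hxs
          rw [PySem.Set.mem_add] at hxs
          rcases hxs with hxs | hxs
          · exact h2 x (List.mem_cons_of_mem _ hx) hx0 hxs
          · exact hx0 hxs
      · by_cases hm : p ∈ s
        · have hc : p ≠ 0 ∧ p ∈ s := ⟨hp, hm⟩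
          simp only [pvLoopA, if_pos hc]
          constructor
          · intro h; exact absurd h (by simp)
          · rintro ⟨_, h2⟩
            exact absurd hm (h2 p List.mem_cons_self hp)
        · have hc : ¬(p ≠ 0 ∧ p ∈ s) := fun h => hm h.2
          simp only [pvLoopA, if_neg hc]
          rw [ih]
          have hfilter : (p :: rest).filter (fun p => decide (p ≠ 0))
              = p :: rest.filter (fun p => decide (p ≠ 0)) := by
            simp [hp]
          rw [hfilter, List.nodup_cons]
          constructor
          · rintro ⟨h1, h2⟩
            refine ⟨⟨?_, h1⟩, ?_⟩
            · intro hmem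
              have hpr := List.mem_of_mem_filter hmem
              exact h2 p hpr hp (by simp [PySem.Set.mem_add])
            · intro x hx hx0 hxs
              rw [List.mem_cons] at hx
              rcases hx with rfl | hx
              · exact hm hxs
              · exact h2 x hx hx0 (by simp [PySem.Set.mem_add, hxs])
          · rintro ⟨⟨h0, h1⟩, h2⟩
            refine ⟨h1, ?_⟩
            intro x hx hx0 hxs
            rw [PySem.Set.mem_add] at hxs
            rcases hxs with hxs | hxs
            · exact h2 x (List.mem_cons_of_mem _ hx) hx0 hxs
            · exact h0 (by subst hxs; exact List.mem_filter.mpr ⟨hx, by simpa using hx0⟩)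

-- On a ≤-sorted list, the adjacent scan succeeds iff the nonzero elements are duplicate-free
theorem pvAdjScan_iff (l : List Int) (hs : l.Pairwise (· ≤ ·)) :
    pvAdjScan l = true ↔ (l.filter (fun p => decide (p ≠ 0))).Nodup := by
  induction l with
  | nil => simp [pvAdjScan]
  | cons a t ih =>
      cases t with
      | nil =>
          simp only [pvAdjScan, true_iff]
          exact (List.nodup_singleton a).filter _
      | cons b t' =>
          have hst : (b :: t').Pairwise (· ≤ ·) := hs.tail
          have hab : a ≤ b := (List.pairwise_cons.mp hs).1 b List.mem_cons_self
          have hale : ∀ x ∈ b :: t', a ≤ x := (List.pairwise_cons.mp hs).1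
          have hble : ∀ x ∈ t', b ≤ x := (List.pairwise_cons.mp hst).1
          have iht := ih hst
          by_cases ha0 : a = 0
          · subst ha0
            have hcond : ((0 : Int) == b && !((0 : Int) == 0)) = false := by simp
            simp only [pvAdjScan, hcond, Bool.false_eq_true, if_false]
            rw [iht]
            simp
          · by_cases hab' : a = b
            · subst hab'
              have hcond : (a == a && !(a == 0)) = true := by simp [ha0]
              simp only [pvAdjScan, hcond, if_true]
              constructor
              · intro h; exact absurd h (by simp)
              · intro h
                have hfa : (a :: a :: t').filter (fun p => decide (p ≠ 0))
                    = a :: a :: t'.filter (fun p => decide (p ≠ 0)) := by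
                  simp [ha0]
                rw [hfa, List.nodup_cons] at h
                exact absurd (List.mem_cons_self) h.1
            · have hcond : (a == b && !(a == 0)) = false := by simp [hab']
              simp only [pvAdjScan, hcond, Bool.false_eq_true, if_false]
              rw [iht]
              have hfa : (a :: b :: t').filter (fun p => decide (p ≠ 0))
                  = a :: (b :: t').filter (fun p => decide (p ≠ 0)) := by
                simp [ha0]
              rw [hfa, List.nodup_cons]
              constructor
              · intro h
                refine ⟨?_, h⟩
                intro hmem
                have hmem' := List.mem_of_mem_filter hmem
                -- a ∈ b :: t' with a ≤ b and b ≤ everything forces a = b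
                rcases List.mem_cons.mp hmem' with rfl | hmem''
                · exact hab' rfl
                · exact hab' (le_antisymm hab (hble a hmem''))
              · exact fun h => h.2

theorem pv_perm_filter (goal : List Int) :
    ((PySem.List.sorted goal (fun x => x) false).filter (fun p => decide (p ≠ 0))).Perm
      (goal.filter (fun p => decide (p ≠ 0))) :=
  (PySem.List.sorted_perm goal (fun x => x) false).filter _

-- ===== VERDICT (by name: the statement is the Claim_ definition above) =====
theorem is_goal_valid_py_spec : Claim_equal_is_goal_valid_py := by
  intro goal _
  unfold Spec_is_goal_valid_py is_goal_valid_py is_goal_valid_py_alt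
  rw [Bool.eq_iff_iff, pvLoopA_iff,
      pvAdjScan_iff _ (PySem.List.sorted_pairwise goal (fun x => x)),
      (pv_perm_filter goal).nodup_iff]
  simp [PySem.Set.empty]
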